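-- pv_equiv track=rewrite | github.com/kalpitdixit/Bapa_asr_experiment_setup | bin/create_timestamped_transcripts.py | read_ref_hyp_line
-- ===== SOURCE A (Python) =====
-- def read_ref_hyp_line(line):
--     chars = []
--     for x in line.strip().split(" ")[1:]:
--         if x=="":
--             continue
--         elif x=="<space>":
--             x = "<SPACE>"
--         chars.append(x)
--     words = get_words(chars)
--     words = [w.replace("*","") for w in words]
--     return words
--
-- def get_words(chars):
--         words = []
--         start_ind = 0
--         while start_ind < len(chars):
--             try:
--                 end_ind = chars.index("<SPACE>", start_ind)
--             except ValueError:
--                 end_ind = len(chars)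
--             words.append("".join(chars[start_ind:end_ind]))
--             start_ind = end_ind + 1
--         return words
-- ===== SOURCE B (Python) =====
-- def read_ref_hyp_line(line):
--     words, buf = [], []
--     for x in line.strip().split(" ")[1:]:
--         if x == "":
--             continue
--         if x == "<space>":
--             x = "<SPACE>"
--         if x == "<SPACE>":
--             words.append("".join(buf))
--             buf = []
--         else:
--             buf.append(x)
--     if buf:
--         words.append("".join(buf))
--     return [w.replace("*", "") for w in words]
-- ===== Notes on version B (the rewrite author's own statement) =====
-- stated objective: simpler
-- what changed: Replaces get_words's while-loop of repeated index searches and slice joins with a single accumulator pass that flushes a word buffer at each separator token (final flush only if the buffer is non-empty), folding the whole job into one loop over the tokens.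
import Mathlib
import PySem

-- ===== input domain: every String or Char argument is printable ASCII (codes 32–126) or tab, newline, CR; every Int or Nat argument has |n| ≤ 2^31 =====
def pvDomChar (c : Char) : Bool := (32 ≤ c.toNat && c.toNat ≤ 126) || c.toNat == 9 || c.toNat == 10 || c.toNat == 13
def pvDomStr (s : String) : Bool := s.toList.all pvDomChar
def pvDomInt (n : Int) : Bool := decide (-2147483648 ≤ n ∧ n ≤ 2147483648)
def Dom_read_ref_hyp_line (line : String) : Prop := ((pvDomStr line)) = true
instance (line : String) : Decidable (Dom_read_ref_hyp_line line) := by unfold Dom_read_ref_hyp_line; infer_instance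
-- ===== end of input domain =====

-- B replaces get_words's repeated chars.index/slice boundary search with one accumulator
-- pass that flushes a word buffer at each "<SPACE>" token (simpler decomposition, same cost).

-- ===== PORT A =====
-- end_ind = chars.index("<SPACE>", start_ind) (ValueError -> len(chars));
-- chars.index(v, s) is transcribed as s + index of v in chars[s:] (exact: same scanned region).
def pvEndInd (chars : List String) (start : Nat) : Nat :=
  match PySem.List.index? (chars.drop start) "<SPACE>" with
  | some k => start + k
  | none => chars.length

-- used by pvGetWords's decreasing_by
lemma pvEndInd_ge (chars : List String) (start : Nat) (h : start ≤ chars.length) :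
    start ≤ pvEndInd chars start := by
  unfold pvEndInd; split <;> omega

-- get_words: while start_ind < len(chars): append "".join(chars[start_ind:end_ind]); start_ind = end_ind+1
def pvGetWords (chars : List String) (start : Nat) : List String :=
  if _h : start < chars.length then
    PySem.Str.join ""
        (PySem.List.slice chars (some (start : Int)) (some ((pvEndInd chars start : Nat) : Int)))
      :: pvGetWords chars (pvEndInd chars start + 1)
  else []
termination_by chars.length - start
decreasing_by
  have := pvEndInd_ge chars start (by omega)
  omega

def read_ref_hyp_line (line : String) : List String :=
  let chars : List String :=
    (PySem.List.slice ((PySem.Str.split? (PySem.Str.strip line) " ").getD []) (some 1) none).foldl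
      (fun chars x =>
        if x = "" then chars
        else chars ++ [if x = "<space>" then "<SPACE>" else x]) []
  let words := pvGetWords chars 0
  words.map (fun w => PySem.Str.replace w "*" "")

-- ===== PORT B =====
def read_ref_hyp_line_alt (line : String) : List String :=
  let wb : List String × List String :=
    (PySem.List.slice ((PySem.Str.split? (PySem.Str.strip line) " ").getD []) (some 1) none).foldl
      (fun wb x =>
        if x = "" then wb
        else
          let x := if x = "<space>" then "<SPACE>" else x
          if x = "<SPACE>" then (wb.1 ++ [PySem.Str.join "" wb.2], [])
          else (wb.1, wb.2 ++ [x])) ([], [])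
  let words := if wb.2.isEmpty then wb.1 else wb.1 ++ [PySem.Str.join "" wb.2]
  words.map (fun w => PySem.Str.replace w "*" "")

-- ===== PRECONDITION & SPEC =====
def Spec_read_ref_hyp_line (line : String) (out : List String) : Prop := out = read_ref_hyp_line_alt line
instance (line : String) (out : List String) : Decidable (Spec_read_ref_hyp_line line out) := by unfold Spec_read_ref_hyp_line; infer_instance

-- ===== CLAIM (what is proved, stated in full; the proofs are below) =====
def Claim_equal_read_ref_hyp_line : Prop := ∀ (line : String), Dom_read_ref_hyp_line line → Spec_read_ref_hyp_line line (read_ref_hyp_line line)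

-- ===== LEMMAS AND PROOFS =====

/-- Per-token normalization: skip "", map "<space>" to "<SPACE>". -/
def pvNorm? (x : String) : Option String :=
  if x = "" then none else some (if x = "<space>" then "<SPACE>" else x)

/-- Clean structural version of get_words. -/
def pvGW (cs : List String) : List String :=
  match h : PySem.List.index? cs "<SPACE>" with
  | some k => PySem.Str.join "" (cs.take k) :: pvGW (cs.drop (k + 1))
  | none => if cs = [] then [] else [PySem.Str.join "" cs]
termination_by cs.length
decreasing_by
  obtain ⟨hk, -, -⟩ := PySem.List.getElem_of_index?_eq_some h
  simp only [List.length_drop]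
  omega

lemma pvGW_none (cs : List String) (h : PySem.List.index? cs "<SPACE>" = none) :
    pvGW cs = if cs = [] then [] else [PySem.Str.join "" cs] := by
  rw [pvGW]
  split
  · rename_i k heq; rw [h] at heq; cases heq
  · rfl

lemma pvGW_some (cs : List String) (k : Nat) (h : PySem.List.index? cs "<SPACE>" = some k) :
    pvGW cs = PySem.Str.join "" (cs.take k) :: pvGW (cs.drop (k + 1)) := by
  rw [pvGW]
  split
  · rename_i k' heq; rw [h] at heq; cases heq; rfl
  · rename_i heq; rw [h] at heq; cases heq

lemma pvCharsFold (t : List String) (acc : List String) :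
    t.foldl (fun chars x =>
        if x = "" then chars
        else chars ++ [if x = "<space>" then "<SPACE>" else x]) acc
      = acc ++ t.filterMap pvNorm? := by
  induction t generalizing acc with
  | nil => simp
  | cons x t ih =>
    simp only [List.foldl_cons, List.filterMap_cons]
    by_cases hx : x = "" <;> simp [hx, ih, pvNorm?]

def pvStepC (wb : List String × List String) (c : String) : List String × List String :=
  if c = "<SPACE>" then (wb.1 ++ [PySem.Str.join "" wb.2], []) else (wb.1, wb.2 ++ [c])

lemma pvStepC_sep (wb : List String × List String) :
    pvStepC wb "<SPACE>" = (wb.1 ++ [PySem.Str.join "" wb.2], []) := by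
  simp [pvStepC]

lemma pvStepC_ne (wb : List String × List String) (c : String) (hc : c ≠ "<SPACE>") :
    pvStepC wb c = (wb.1, wb.2 ++ [c]) := by
  simp [pvStepC, hc]

/-- B's loop body, named (definitionally equal to the lambda in the port). -/
def pvStepB (wb : List String × List String) (x : String) : List String × List String :=
  if x = "" then wb
  else
    let x := if x = "<space>" then "<SPACE>" else x
    if x = "<SPACE>" then (wb.1 ++ [PySem.Str.join "" wb.2], [])
    else (wb.1, wb.2 ++ [x])

lemma pvStepB_empty (wb : List String × List String) : pvStepB wb "" = wb := by
  simp [pvStepB]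

lemma pvStepB_ne (wb : List String × List String) (x : String) (hx : x ≠ "") :
    pvStepB wb x = pvStepC wb (if x = "<space>" then "<SPACE>" else x) := by
  rw [pvStepB, if_neg hx, pvStepC]

lemma pvBFold (t : List String) (wb : List String × List String) :
    t.foldl (fun wb x =>
        if x = "" then wb
        else
          let x := if x = "<space>" then "<SPACE>" else x
          if x = "<SPACE>" then (wb.1 ++ [PySem.Str.join "" wb.2], [])
          else (wb.1, wb.2 ++ [x])) wb
      = (t.filterMap pvNorm?).foldl pvStepC wb := by
  suffices h : ∀ (t : List String) (wb : List String × List String),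
      t.foldl pvStepB wb = (t.filterMap pvNorm?).foldl pvStepC wb from h t wb
  intro t
  induction t with
  | nil => intro wb; rfl
  | cons x t ih =>
    intro wb
    rcases hfx : pvNorm? x with _ | c
    · have hx : x = "" := by
        by_contra h
        simp [pvNorm?, h] at hfx
      subst hx
      rw [List.filterMap_cons_none hfx, List.foldl_cons, pvStepB_empty, ih]
    · have hx : x ≠ "" := by
        intro h; subst h; simp [pvNorm?] at hfx
      have hc : c = if x = "<space>" then "<SPACE>" else x := by
        rw [pvNorm?, if_neg hx] at hfx
        exact (Option.some.inj hfx).symm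
      rw [List.filterMap_cons_some hfx, List.foldl_cons, List.foldl_cons,
        pvStepB_ne _ _ hx, ← hc, ih]

def pvFinish (wb : List String × List String) : List String :=
  if wb.2.isEmpty then wb.1 else wb.1 ++ [PySem.Str.join "" wb.2]

lemma pvFinish_def (wb : List String × List String) :
    pvFinish wb = if wb.2.isEmpty then wb.1 else wb.1 ++ [PySem.Str.join "" wb.2] := rfl

lemma pvFoldC_gw (cs : List String) (ws buf : List String) (hb : "<SPACE>" ∉ buf) :
    pvFinish (cs.foldl pvStepC (ws, buf)) = ws ++ pvGW (buf ++ cs) := by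
  induction cs generalizing ws buf with
  | nil =>
    have hnone : PySem.List.index? (buf ++ ([] : List String)) "<SPACE>" = none := by
      rw [PySem.List.index?_eq_none_iff]; simpa using hb
    rw [List.foldl_nil, pvGW_none _ hnone]
    rcases buf with _ | ⟨b, bs⟩ <;> simp [pvFinish]
  | cons c cs ih =>
    by_cases hc : c = "<SPACE>"
    · subst hc
      rw [List.foldl_cons, pvStepC_sep, ih _ [] (by simp), List.nil_append]
      have hidx : PySem.List.index? (buf ++ "<SPACE>" :: cs) "<SPACE>" = some buf.length :=
        (PySem.List.index?_eq_some_iff _ _ _).mpr ⟨buf, cs, rfl, rfl, hb⟩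
      rw [pvGW_some _ _ hidx, List.take_left' rfl]
      have h1 : buf.length + 1 = (buf ++ ["<SPACE>"]).length := by simp
      rw [show buf ++ "<SPACE>" :: cs = (buf ++ ["<SPACE>"]) ++ cs by simp, h1, List.drop_left]
      simp
    · rw [List.foldl_cons, pvStepC_ne _ _ hc, ih _ (buf ++ [c]) (by simp [hb, Ne.symm hc])]
      simp

lemma pvGetWords_eq_gw : ∀ (n : Nat) (chars : List String) (s : Nat),
    chars.length - s ≤ n → pvGetWords chars s = pvGW (chars.drop s) := by
  intro n
  induction n with
  | zero =>
    intro chars s hs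
    rw [pvGetWords, dif_neg (by omega), pvGW_none, if_pos]
    · simp only [List.drop_eq_nil_iff]; omega
    · rw [PySem.List.index?_eq_none_iff, List.drop_eq_nil_iff.mpr (by omega)]
      simp
  | succ n ih =>
    intro chars s hs
    by_cases h : s < chars.length
    · rw [pvGetWords, dif_pos h]
      rcases hidx : PySem.List.index? (chars.drop s) "<SPACE>" with _ | k
      · -- no separator from s on
        have he : pvEndInd chars s = chars.length := by unfold pvEndInd; rw [hidx]
        have hnil : chars.drop s ≠ [] := by
          simp only [ne_eq, List.drop_eq_nil_iff]; omega
        have hle : chars.length - (chars.length + 1) ≤ n := by omega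
        rw [pvGW_none _ hidx, if_neg hnil, he,
          ih chars (chars.length + 1) hle, List.drop_eq_nil_iff.mpr (by omega),
          pvGW_none _ (by simp), if_pos rfl,
          PySem.List.slice_natCast, List.take_of_length_le (by simp)]
      · have hk : k < chars.length - s := by
          obtain ⟨hk, -, -⟩ := PySem.List.getElem_of_index?_eq_some hidx
          rw [List.length_drop] at hk
          exact hk
        have he : pvEndInd chars s = s + k := by unfold pvEndInd; rw [hidx]
        have hle : chars.length - (s + k + 1) ≤ n := by omega
        have hdd : (chars.drop s).drop (k + 1) = chars.drop (s + k + 1) := by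
          rw [List.drop_drop]; congr 1
        have hsl : PySem.List.slice chars (some ((s : Nat) : Int)) (some (((s + k : Nat)) : Int))
            = (chars.drop s).take k := by
          rw [PySem.List.slice_natCast, Nat.add_sub_cancel_left]
        rw [pvGW_some _ _ hidx, he, ih chars (s + k + 1) hle, hdd, hsl]
    · rw [pvGetWords, dif_neg h, pvGW_none, if_pos]
      · simp only [List.drop_eq_nil_iff]; omega
      · rw [PySem.List.index?_eq_none_iff, List.drop_eq_nil_iff.mpr (by omega)]
        simp

lemma pvGetWords_zero (chars : List String) : pvGetWords chars 0 = pvGW chars := by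
  rw [pvGetWords_eq_gw chars.length chars 0 (by omega), List.drop_zero]

-- ===== VERDICT (by name: the statement is the Claim_ definition above) =====
theorem read_ref_hyp_line_spec : Claim_equal_read_ref_hyp_line := by
  intro line _
  unfold Spec_read_ref_hyp_line read_ref_hyp_line read_ref_hyp_line_alt
  simp only
  rw [pvCharsFold, pvBFold, List.nil_append, pvGetWords_zero, ← pvFinish_def,
    pvFoldC_gw _ [] [] (by simp), List.nil_append]
  rw [List.nil_append]
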